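-- pv_equiv track=rewrite | github.com/lenhop/IC-AI-Chat-Client | app/services/prompt_render.py | format_messages_markdown_for_prompt
-- ===== SOURCE A (Python) =====
-- from typing import Any, Dict, List
--
-- def _all_messages_have_nonempty_turn_id(messages: List[Dict[str, Any]]) -> bool:
--     """True when every message carries a non-blank ``turn_id`` (M3 v3.2 grouping)."""
--     if not messages:
--         return False
--     for m in messages:
--         tid = str(m.get("turn_id") or "").strip()
--         if not tid:
--             return False
--     return True
--
-- def split_messages_into_rounds(messages: List[Dict[str, Any]]) -> List[List[Dict[str, Any]]]:
--     """
--     Split normalized messages into conversation rounds.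
--
--     When every row has a non-empty ``turn_id``, group consecutive rows that share
--     the same ``turn_id`` (multi-query clarifications stay one round). Otherwise
--     fall back to historical-data compatibility behavior: each new ``type=query`` starts a round.
--
--     Args:
--         messages: Normalized records (ordered).
--
--     Returns:
--         List of rounds; each round is a non-empty list of message dicts.
--     """
--     if not messages:
--         return []
--     if _all_messages_have_nonempty_turn_id(messages):
--         rounds: List[List[Dict[str, Any]]] = []
--         current: List[Dict[str, Any]] = [messages[0]]
--         cur_tid = str(messages[0].get("turn_id") or "").strip()
--         for m in messages[1:]:
--             tid = str(m.get("turn_id") or "").strip()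
--             if tid == cur_tid:
--                 current.append(m)
--             else:
--                 rounds.append(current)
--                 current = [m]
--                 cur_tid = tid
--         rounds.append(current)
--         return rounds
--     rounds_q: List[List[Dict[str, Any]]] = []
--     current_q: List[Dict[str, Any]] = []
--     for m in messages:
--         mtype = (m.get("type") or "").strip()
--         if mtype == "query" and current_q:
--             rounds_q.append(current_q)
--             current_q = []
--         current_q.append(m)
--     if current_q:
--         rounds_q.append(current_q)
--     return rounds_q
--
-- def format_messages_markdown_for_prompt(messages: List[Dict[str, Any]]) -> str:
--     """
--     Format selected messages as Markdown (type, timestamp, content per line).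
--
--     Args:
--         messages: Flat list of normalized dicts.
--
--     Returns:
--         Markdown string (empty if no messages).
--     """
--     if not messages:
--         return "(No prior messages in this session.)"
--     lines: List[str] = ["## Historical Conversation", ""]
--     rounds = split_messages_into_rounds(messages)
--     for idx, round_msgs in enumerate(rounds, start=1):
--         ts = (round_msgs[0].get("timestamp") or "").strip() or "—"
--         lines.append(f"### Turn {idx} (started at {ts})")
--         lines.append("")
--         for m in round_msgs:
--             mtype = (m.get("type") or "unknown").strip()
--             content = (m.get("content") or "").strip() or "—"
--             mts = (m.get("timestamp") or "").strip() or "—"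
--             lines.append(f"- **type:** `{mtype}`  **at:** {mts}")
--             lines.append(f"  **content:** {content}")
--         lines.append("")
--         if idx < len(rounds):
--             lines.append("---")
--             lines.append("")
--     return "\n".join(lines).strip()
-- ===== SOURCE B (Python) =====
-- def _message_lines(m):
--     mtype = (m.get("type") or "unknown").strip()
--     content = (m.get("content") or "").strip() or "\u2014"
--     mts = (m.get("timestamp") or "").strip() or "\u2014"
--     return [f"- **type:** `{mtype}`  **at:** {mts}", f"  **content:** {content}"]
--
--
-- def format_messages_markdown_for_prompt(messages):
--     """Single streaming pass: decides round boundaries and emits markdown together,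
--     never materializing a list of rounds; separators are prepended before each new round."""
--     if not messages:
--         return "(No prior messages in this session.)"
--     tid_mode = all(str(m.get("turn_id") or "").strip() for m in messages)
--     first = messages[0]
--     ts0 = (first.get("timestamp") or "").strip() or "\u2014"
--     lines = ["## Historical Conversation", "", f"### Turn 1 (started at {ts0})", ""]
--     lines += _message_lines(first)
--     prev_tid = str(first.get("turn_id") or "").strip()
--     turn = 1
--     for m in messages[1:]:
--         tid = str(m.get("turn_id") or "").strip()
--         if (tid != prev_tid) if tid_mode else ((m.get("type") or "").strip() == "query"):
--             turn += 1
--             ts = (m.get("timestamp") or "").strip() or "\u2014"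
--             lines += ["", "---", "", f"### Turn {turn} (started at {ts})", ""]
--         lines += _message_lines(m)
--         prev_tid = tid
--     lines.append("")
--     return "\n".join(lines).strip()
-- ===== Notes on version B (the rewrite author's own statement) =====
-- stated objective: alternative
-- what changed: B fuses grouping and rendering into one streaming pass over the messages that never materializes the list of rounds: round boundaries (same two modes) are decided inline against the previous message, and the '---' separator block is emitted before each new round instead of after each non-last round.
import Mathlib
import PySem

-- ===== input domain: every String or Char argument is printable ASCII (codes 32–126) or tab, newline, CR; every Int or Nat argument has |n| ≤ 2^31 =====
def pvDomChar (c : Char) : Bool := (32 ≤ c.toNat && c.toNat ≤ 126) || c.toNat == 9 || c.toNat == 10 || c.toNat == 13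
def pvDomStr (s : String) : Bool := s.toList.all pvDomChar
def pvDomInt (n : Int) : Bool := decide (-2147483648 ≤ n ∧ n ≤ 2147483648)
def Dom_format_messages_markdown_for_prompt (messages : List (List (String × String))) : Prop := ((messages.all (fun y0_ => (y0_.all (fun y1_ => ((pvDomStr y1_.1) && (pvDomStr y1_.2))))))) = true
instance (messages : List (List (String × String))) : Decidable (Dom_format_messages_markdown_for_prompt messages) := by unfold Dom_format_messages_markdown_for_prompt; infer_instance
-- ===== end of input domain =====

-- ===== PORT A =====
-- B fuses grouping and rendering into one streaming pass (no list of rounds); same output, similar cost.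
-- shared tiny expression helpers (both Pythons build the identical per-message lines / header text)
def pvGetS (m : List (String × String)) (k : String) : String :=
  ((PySem.Dict.get? (PySem.Dict.mk m) k).getD "")

-- Python's `s or d` on strings
def pvOr (s d : String) : String := if s = "" then d else s

def pvTid (m : List (String × String)) : String := PySem.Str.strip (pvGetS m "turn_id")

def pvTs (m : List (String × String)) : String := pvOr (PySem.Str.strip (pvGetS m "timestamp")) "—"

def pvHeader (j : Nat) (m : List (String × String)) : String :=
  "### Turn " ++ toString j ++ " (started at " ++ pvTs m ++ ")"

def pvMsgLines (m : List (String × String)) : List String :=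
  ["- **type:** `" ++ PySem.Str.strip (pvOr (pvGetS m "type") "unknown") ++ "`  **at:** " ++ pvTs m,
   "  **content:** " ++ pvOr (PySem.Str.strip (pvGetS m "content")) "—"]

-- _all_messages_have_nonempty_turn_id: early-return loop
def pvAllTidA : List (List (String × String)) → Bool
  | [] => true
  | m :: r => if pvTid m = "" then false else pvAllTidA r

def pvAllNonemptyA (ms : List (List (String × String))) : Bool :=
  if ms = [] then false else pvAllTidA ms

-- turn_id grouping loop of split_messages_into_rounds
def pvGo1 (rounds : List (List (List (String × String)))) (cur : List (List (String × String)))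
    (curTid : String) : List (List (String × String)) → List (List (List (String × String)))
  | [] => rounds ++ [cur]
  | m :: rest =>
    if pvTid m = curTid then pvGo1 rounds (cur ++ [m]) curTid rest
    else pvGo1 (rounds ++ [cur]) [m] (pvTid m) rest

-- type=='query' fallback loop of split_messages_into_rounds
def pvGo2 (rounds : List (List (List (String × String)))) (cur : List (List (String × String))) :
    List (List (String × String)) → List (List (List (String × String)))
  | [] => if cur ≠ [] then rounds ++ [cur] else rounds
  | m :: rest =>
    if PySem.Str.strip (pvGetS m "type") = "query" ∧ cur ≠ [] then pvGo2 (rounds ++ [cur]) [m] rest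
    else pvGo2 rounds (cur ++ [m]) rest

def pvSplitRounds (ms : List (List (String × String))) : List (List (List (String × String))) :=
  match ms with
  | [] => []
  | m0 :: rest =>
    if pvAllNonemptyA (m0 :: rest) then pvGo1 [] [m0] (pvTid m0) rest
    else pvGo2 [] [] (m0 :: rest)

-- the enumerate(rounds, 1) emission loop of format_messages_markdown_for_prompt
def pvEmitA (n : Nat) (idx : Nat) : List (List (List (String × String))) → List String
  | [] => []
  | r :: rest =>
    [pvHeader idx (r.headD []), ""] ++ r.flatMap pvMsgLines ++ [""]
      ++ (if idx < n then ["---", ""] else []) ++ pvEmitA n (idx + 1) rest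

def format_messages_markdown_for_prompt (messages : List (List (String × String))) : String :=
  if messages = [] then "(No prior messages in this session.)"
  else
    let rounds := pvSplitRounds messages
    PySem.Str.strip (PySem.Str.join "\n"
      (["## Historical Conversation", ""] ++ pvEmitA rounds.length 1 rounds))

-- ===== PORT B =====
def pvBoundary (tidMode : Bool) (ptid : String) (m : List (String × String)) : Bool :=
  if tidMode then pvTid m != ptid else PySem.Str.strip (pvGetS m "type") == "query"

-- B's single streaming loop: state = (lines, prev turn_id, turn counter)
def pvGoB (tidMode : Bool) (lines : List String) (ptid : String) (turn : Nat) :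
    List (List (String × String)) → List String
  | [] => lines
  | m :: rest =>
    if pvBoundary tidMode ptid m then
      pvGoB tidMode (lines ++ ["", "---", "", pvHeader (turn + 1) m, ""] ++ pvMsgLines m)
        (pvTid m) (turn + 1) rest
    else pvGoB tidMode (lines ++ pvMsgLines m) (pvTid m) turn rest

def format_messages_markdown_for_prompt_alt (messages : List (List (String × String))) : String :=
  match messages with
  | [] => "(No prior messages in this session.)"
  | m0 :: rest =>
    let tidMode := (m0 :: rest).all (fun m => pvTid m != "")
    let init := ["## Historical Conversation", "", pvHeader 1 m0, ""] ++ pvMsgLines m0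
    PySem.Str.strip (PySem.Str.join "\n" (pvGoB tidMode init (pvTid m0) 1 rest ++ [""]))

-- ===== PRECONDITION & SPEC =====
def Spec_format_messages_markdown_for_prompt (messages : List (List (String × String))) (out : String) : Prop := out = format_messages_markdown_for_prompt_alt messages
instance (messages : List (List (String × String))) (out : String) : Decidable (Spec_format_messages_markdown_for_prompt messages out) := by unfold Spec_format_messages_markdown_for_prompt; infer_instance

-- ===== CLAIM (what is proved, stated in full; the proofs are below) =====
def Claim_equal_format_messages_markdown_for_prompt : Prop := ∀ (messages : List (List (String × String))), Dom_format_messages_markdown_for_prompt messages → Spec_format_messages_markdown_for_prompt messages (format_messages_markdown_for_prompt messages)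

-- ===== LEMMAS AND PROOFS =====

-- continuation of the current round / remaining full rounds, turn_id mode
def pvExt1 (t : String) : List (List (String × String)) →
    List (List (String × String)) × List (List (List (String × String)))
  | [] => ([], [])
  | m :: r =>
    if pvTid m = t then ((pvExt1 t r).1 |> (m :: ·), (pvExt1 t r).2)
    else ([], (m :: (pvExt1 (pvTid m) r).1) :: (pvExt1 (pvTid m) r).2)

-- same, query mode
def pvExt2 : List (List (String × String)) →
    List (List (String × String)) × List (List (List (String × String)))
  | [] => ([], [])
  | m :: r =>
    if PySem.Str.strip (pvGetS m "type") = "query" then ([], (m :: (pvExt2 r).1) :: (pvExt2 r).2)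
    else (m :: (pvExt2 r).1, (pvExt2 r).2)

-- the lines pvEmitA produces after the current round's own messages
def pvEmitTail (j : Nat) : List (List (List (String × String))) → List String
  | [] => [""]
  | r :: rs => ["", "---", "", pvHeader j (r.headD []), ""] ++ r.flatMap pvMsgLines ++ pvEmitTail (j + 1) rs

-- the lines pvGoB appends
def pvRestB (tidMode : Bool) (t : String) (turn : Nat) : List (List (String × String)) → List String
  | [] => []
  | m :: r =>
    if pvBoundary tidMode t m then
      ["", "---", "", pvHeader (turn + 1) m, ""] ++ pvMsgLines m ++ pvRestB tidMode (pvTid m) (turn + 1) r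
    else pvMsgLines m ++ pvRestB tidMode (pvTid m) turn r

theorem pvGo1_ext (ms : List (List (String × String))) :
    ∀ rounds cur t, pvGo1 rounds cur t ms = rounds ++ [cur ++ (pvExt1 t ms).1] ++ (pvExt1 t ms).2 := by
  induction ms with
  | nil => intro rounds cur t; simp [pvGo1, pvExt1]
  | cons m r ih =>
    intro rounds cur t
    by_cases h : pvTid m = t
    · simp [pvGo1, pvExt1, h, ih]
    · simp [pvGo1, pvExt1, h, ih]

theorem pvGo2_ext (ms : List (List (String × String))) :
    ∀ rounds cur, cur ≠ [] → pvGo2 rounds cur ms = rounds ++ [cur ++ (pvExt2 ms).1] ++ (pvExt2 ms).2 := by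
  induction ms with
  | nil => intro rounds cur hc; simp [pvGo2, pvExt2, hc]
  | cons m r ih =>
    intro rounds cur hc
    by_cases h : PySem.Str.strip (pvGetS m "type") = "query"
    · simp [pvGo2, pvExt2, h, hc, ih _ [m] (by simp)]
    · simp [pvGo2, pvExt2, h, hc, ih _ (cur ++ [m]) (by simp)]

theorem pvEmitA_eq (rs : List (List (List (String × String)))) :
    ∀ idx r n, idx + rs.length = n →
      pvEmitA n idx (r :: rs) = [pvHeader idx (r.headD []), ""] ++ r.flatMap pvMsgLines ++ pvEmitTail (idx + 1) rs := by
  induction rs with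
  | nil =>
    intro idx r n h
    simp at h
    have hn : ¬ idx < n := by omega
    simp [pvEmitA, pvEmitTail, hn]
  | cons r' rs' ih =>
    intro idx r n h
    simp at h
    have hlt : idx < n := by omega
    rw [show pvEmitA n idx (r :: r' :: rs')
        = [pvHeader idx (r.headD []), ""] ++ r.flatMap pvMsgLines ++ [""]
          ++ (if idx < n then ["---", ""] else []) ++ pvEmitA n (idx + 1) (r' :: rs') from rfl]
    rw [ih (idx + 1) r' n (by omega), if_pos hlt]
    simp [pvEmitTail]

theorem pvGoB_rest (tidMode : Bool) (ms : List (List (String × String))) :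
    ∀ lines t turn, pvGoB tidMode lines t turn ms = lines ++ pvRestB tidMode t turn ms := by
  induction ms with
  | nil => intro lines t turn; simp [pvGoB, pvRestB]
  | cons m r ih =>
    intro lines t turn
    by_cases h : pvBoundary tidMode t m
    · simp [pvGoB, pvRestB, h, ih]
    · simp [pvGoB, pvRestB, h, ih]

theorem pvCore1 (ms : List (List (String × String))) :
    ∀ t idx, (pvExt1 t ms).1.flatMap pvMsgLines ++ pvEmitTail (idx + 1) (pvExt1 t ms).2
      = pvRestB true t idx ms ++ [""] := by
  induction ms with
  | nil => intro t idx; simp [pvExt1, pvEmitTail, pvRestB]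
  | cons m r ih =>
    intro t idx
    by_cases h : pvTid m = t
    · have hb : pvBoundary true t m = false := by simp [pvBoundary, h]
      simp [pvExt1, pvRestB, h, hb, ih t idx]
    · have hb : pvBoundary true t m = true := by simp [pvBoundary, h]
      simp [pvExt1, pvRestB, h, hb, pvEmitTail, ih (pvTid m) (idx + 1)]
  
theorem pvCore2 (ms : List (List (String × String))) :
    ∀ t idx, (pvExt2 ms).1.flatMap pvMsgLines ++ pvEmitTail (idx + 1) (pvExt2 ms).2
      = pvRestB false t idx ms ++ [""] := by
  induction ms with
  | nil => intro t idx; simp [pvExt2, pvEmitTail, pvRestB]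
  | cons m r ih =>
    intro t idx
    by_cases h : PySem.Str.strip (pvGetS m "type") = "query"
    · have hb : pvBoundary false t m = true := by simp [pvBoundary, h]
      simp [pvExt2, pvRestB, h, hb, pvEmitTail, ih (pvTid m) (idx + 1)]
    · have hb : pvBoundary false t m = false := by simp [pvBoundary, h]
      simp [pvExt2, pvRestB, h, hb, ih (pvTid m) idx]

theorem pvAllTidA_eq (ms : List (List (String × String))) :
    pvAllTidA ms = ms.all (fun m => pvTid m != "") := by
  induction ms with
  | nil => simp [pvAllTidA]
  | cons m r ih =>
    by_cases h : pvTid m = ""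
    · simp [pvAllTidA, h]
    · simp [pvAllTidA, h, ih]

theorem pvSplit_char (m0 : List (String × String)) (rest : List (List (String × String))) :
    pvSplitRounds (m0 :: rest) =
      if ((m0 :: rest).all (fun m => pvTid m != "")) = true then pvGo1 [] [m0] (pvTid m0) rest
      else pvGo2 [] [m0] rest := by
  simp only [pvSplitRounds, pvAllNonemptyA, pvAllTidA_eq, reduceCtorEq, if_false]
  by_cases h : ((m0 :: rest).all (fun m => pvTid m != "")) = true
  · simp [h]
  · simp [h, pvGo2]

-- ===== VERDICT (by name: the statement is the Claim_ definition above) =====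
theorem format_messages_markdown_for_prompt_spec : Claim_equal_format_messages_markdown_for_prompt := by
  intro messages _
  unfold Spec_format_messages_markdown_for_prompt
  match messages with
  | [] => rfl
  | m0 :: rest =>
    unfold format_messages_markdown_for_prompt format_messages_markdown_for_prompt_alt
    simp only [reduceCtorEq, if_false]
    rw [pvGoB_rest, pvSplit_char]
    by_cases hmode : ((m0 :: rest).all (fun m => pvTid m != "")) = true
    · rw [if_pos hmode]
      rw [pvGo1_ext]
      simp only [hmode, List.nil_append, List.singleton_append]
      rw [pvEmitA_eq (pvExt1 (pvTid m0) rest).2 1 (m0 :: (pvExt1 (pvTid m0) rest).1)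
            ((m0 :: (pvExt1 (pvTid m0) rest).1) :: (pvExt1 (pvTid m0) rest).2).length (by simp; omega)]
      simp [pvCore1 rest (pvTid m0) 1]
    · rw [if_neg hmode]
      simp only [Bool.not_eq_true] at hmode
      rw [pvGo2_ext rest [] [m0] (by simp)]
      simp only [hmode, List.nil_append, List.singleton_append]
      rw [pvEmitA_eq (pvExt2 rest).2 1 (m0 :: (pvExt2 rest).1)
            ((m0 :: (pvExt2 rest).1) :: (pvExt2 rest).2).length (by simp; omega)]
      simp [pvCore2 rest (pvTid m0) 1]
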